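-- pv_equiv track=rewrite | github.com/madhuhasa/digital-alpha | atulexam.py | sortAndPrint
-- ===== SOURCE A (Python) =====
-- def sortAndPrint(numList,x):
--     numList.sort()
--     flag = False
--     for i in range(len(numList)):
--         if (numList[i] == x):
--             flag = True
--             return ("Number found at position "+str(i + 1))
--             break
--     if flag == False:
--         return ("Number not found")
-- ===== SOURCE B (Python) =====
-- def sortAndPrint(numList, x):
--     numList.sort()
--     lo, hi = 0, len(numList)
--     while lo < hi:
--         mid = (lo + hi) // 2
--         if numList[mid] < x:
--             lo = mid + 1
--         else:
--             hi = mid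
--     if lo < len(numList) and numList[lo] == x:
--         return "Number found at position " + str(lo + 1)
--     return "Number not found"
-- ===== Notes on version B (the rewrite author's own statement) =====
-- stated objective: alternative
-- what changed: After the same in-place sort, the linear first-occurrence scan is replaced by a hand-written binary search (leftmost insertion point) followed by a single membership check.
import Mathlib
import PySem

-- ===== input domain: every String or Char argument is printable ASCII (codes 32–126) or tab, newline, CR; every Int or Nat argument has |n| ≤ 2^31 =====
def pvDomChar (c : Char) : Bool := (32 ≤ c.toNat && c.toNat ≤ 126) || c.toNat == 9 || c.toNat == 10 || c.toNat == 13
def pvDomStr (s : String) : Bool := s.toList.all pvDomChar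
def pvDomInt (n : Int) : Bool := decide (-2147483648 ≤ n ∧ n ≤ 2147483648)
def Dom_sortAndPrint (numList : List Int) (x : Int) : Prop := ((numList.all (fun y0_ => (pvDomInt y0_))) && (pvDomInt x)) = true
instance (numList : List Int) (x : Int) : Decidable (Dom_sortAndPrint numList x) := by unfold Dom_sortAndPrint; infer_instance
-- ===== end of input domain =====

-- B replaces A's linear scan over the sorted list by a hand-written binary search (same
-- result, same in-place sort of the argument; equivalence proved about the return value).

-- ===== PORT A =====
-- A's for-loop over range(len(numList)) with early return; index i is always in [0, len), so
-- List.getD is exact for numList[i].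
def sortAndPrintLoop (s : List Int) (x : Int) (i : Nat) : Option String :=
  if i < s.length then
    if s.getD i 0 = x then
      some ("Number found at position " ++ PySem.Int.toStr ((i : Int) + 1))
    else sortAndPrintLoop s x (i + 1)
  else none
termination_by s.length - i

def sortAndPrint (numList : List Int) (x : Int) : String :=
  let s := PySem.List.sorted numList (fun y => y) false
  match sortAndPrintLoop s x 0 with
  | some r => r
  | none => "Number not found"

-- ===== PORT B =====
-- Source B's while-loop binary search; lo, hi, mid stay in [0, len], mid in [0, len) when read,
-- so List.getD is exact for numList[mid]; (lo+hi)//2 on naturals is Nat division.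
def bsearchLoop (s : List Int) (x : Int) (lo hi : Nat) : Nat :=
  if lo < hi then
    let mid := (lo + hi) / 2
    if s.getD mid 0 < x then bsearchLoop s x (mid + 1) hi
    else bsearchLoop s x lo mid
  else lo
termination_by hi - lo
decreasing_by all_goals omega

def sortAndPrint_alt (numList : List Int) (x : Int) : String :=
  let s := PySem.List.sorted numList (fun y => y) false
  let lo := bsearchLoop s x 0 s.length
  if lo < s.length ∧ s.getD lo 0 = x then
    "Number found at position " ++ PySem.Int.toStr ((lo : Int) + 1)
  else "Number not found"

-- ===== PRECONDITION & SPEC =====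
def Spec_sortAndPrint (numList : List Int) (x : Int) (out : String) : Prop := out = sortAndPrint_alt numList x
instance (numList : List Int) (x : Int) (out : String) : Decidable (Spec_sortAndPrint numList x out) := by unfold Spec_sortAndPrint; infer_instance

-- ===== CLAIM (what is proved, stated in full; the proofs are below) =====
def Claim_equal_sortAndPrint : Prop := ∀ (numList : List Int) (x : Int), Dom_sortAndPrint numList x → Spec_sortAndPrint numList x (sortAndPrint numList x)

-- ===== LEMMAS AND PROOFS =====

-- monotonicity of the sorted list in getD form
lemma sorted_getD_mono (xs : List Int) {p q : Nat} (hpq : p ≤ q)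
    (hq : q < (PySem.List.sorted xs (fun y => y) false).length) :
    (PySem.List.sorted xs (fun y => y) false).getD p 0 ≤
      (PySem.List.sorted xs (fun y => y) false).getD q 0 := by
  rw [List.getD_eq_getElem _ _ (lt_of_le_of_lt hpq hq), List.getD_eq_getElem _ _ hq]
  exact PySem.List.sorted_id_getElem_mono xs hpq hq

-- the binary search returns a split point: everything before it is < x, everything from it on is ≥ x
lemma bsearchLoop_spec (s : List Int) (x : Int)
    (hmono : ∀ p q, p ≤ q → q < s.length → s.getD p 0 ≤ s.getD q 0) :
    ∀ fuel lo hi, hi - lo ≤ fuel → lo ≤ hi → hi ≤ s.length →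
    (∀ j, j < lo → s.getD j 0 < x) →
    (∀ j, hi ≤ j → j < s.length → x ≤ s.getD j 0) →
    bsearchLoop s x lo hi ≤ s.length ∧
    (∀ j, j < bsearchLoop s x lo hi → s.getD j 0 < x) ∧
    (∀ j, bsearchLoop s x lo hi ≤ j → j < s.length → x ≤ s.getD j 0) := by
  intro fuel
  induction fuel with
  | zero =>
    intro lo hi hf hlh hhl hlt hge
    have : ¬ lo < hi := by omega
    rw [bsearchLoop, if_neg this]
    exact ⟨by omega, hlt, fun j hj hjl => hge j (by omega) hjl⟩
  | succ n ih =>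
    intro lo hi hf hlh hhl hlt hge
    by_cases h : lo < hi
    · rw [bsearchLoop, if_pos h]
      simp only
      have hmid1 : lo ≤ (lo + hi) / 2 := by omega
      have hmid2 : (lo + hi) / 2 < hi := by omega
      by_cases hc : s.getD ((lo + hi) / 2) 0 < x
      · rw [if_pos hc]
        apply ih ((lo + hi) / 2 + 1) hi (by omega) (by omega) hhl
        · intro j hj
          by_cases hjlo : j < lo
          · exact hlt j hjlo
          · exact lt_of_le_of_lt (hmono j ((lo + hi) / 2) (by omega) (by omega)) hc
        · exact hge
      · rw [if_neg hc]
        apply ih lo ((lo + hi) / 2) (by omega) (by omega) (by omega) hlt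
        intro j hj hjl
        exact le_trans (not_lt.mp hc) (hmono ((lo + hi) / 2) j hj hjl)
    · rw [bsearchLoop, if_neg h]
      exact ⟨by omega, hlt, fun j hj hjl => hge j (by omega) hjl⟩

-- A's scan finds x at index k when nothing before k (from i on) equals x
lemma sortAndPrintLoop_found (s : List Int) (x : Int) (k : Nat)
    (hk : k < s.length) (hkx : s.getD k 0 = x) :
    ∀ fuel i, k - i ≤ fuel → i ≤ k → (∀ j, i ≤ j → j < k → s.getD j 0 ≠ x) →
    sortAndPrintLoop s x i = some ("Number found at position " ++ PySem.Int.toStr ((k : Int) + 1)) := by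
  intro fuel
  induction fuel with
  | zero =>
    intro i hf hik _
    have : i = k := by omega
    subst this
    rw [sortAndPrintLoop, if_pos hk, if_pos hkx]
  | succ n ih =>
    intro i hf hik hne
    by_cases hik' : i = k
    · subst hik'
      rw [sortAndPrintLoop, if_pos hk, if_pos hkx]
    · have hlt : i < k := by omega
      rw [sortAndPrintLoop, if_pos (by omega), if_neg (hne i le_rfl hlt)]
      exact ih (i + 1) (by omega) (by omega) (fun j hj hjk => hne j (by omega) hjk)

-- A's scan finds nothing when no index holds x
lemma sortAndPrintLoop_none (s : List Int) (x : Int)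
    (hne : ∀ j, j < s.length → s.getD j 0 ≠ x) :
    ∀ fuel i, s.length - i ≤ fuel → sortAndPrintLoop s x i = none := by
  intro fuel
  induction fuel with
  | zero =>
    intro i hf
    rw [sortAndPrintLoop, if_neg (by omega)]
  | succ n ih =>
    intro i hf
    by_cases h : i < s.length
    · rw [sortAndPrintLoop, if_pos h, if_neg (hne i h)]
      exact ih (i + 1) (by omega)
    · rw [sortAndPrintLoop, if_neg h]

-- ===== VERDICT (by name: the statement is the Claim_ definition above) =====
theorem sortAndPrint_spec : Claim_equal_sortAndPrint := by
  intro numList x _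
  unfold Spec_sortAndPrint sortAndPrint sortAndPrint_alt
  simp only
  set s := PySem.List.sorted numList (fun y => y) false with hs
  have hmono : ∀ p q, p ≤ q → q < s.length → s.getD p 0 ≤ s.getD q 0 :=
    fun p q hpq hq => sorted_getD_mono numList hpq hq
  set lo := bsearchLoop s x 0 s.length with hlo
  obtain ⟨hlen, hlt, hge⟩ :=
    bsearchLoop_spec s x hmono s.length 0 s.length le_rfl (by omega) le_rfl
      (by omega) (fun j hj hjl => by omega)
  by_cases hfound : lo < s.length ∧ s.getD lo 0 = x
  · rw [if_pos hfound]
    rw [sortAndPrintLoop_found s x lo hfound.1 hfound.2 lo 0 (by omega) (by omega)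
      (fun j _ hj => ne_of_lt (hlt j hj))]
  · rw [if_neg hfound]
    have hne : ∀ j, j < s.length → s.getD j 0 ≠ x := by
      intro j hj
      by_cases hjlo : j < lo
      · exact ne_of_lt (hlt j hjlo)
      · have hxr : x ≤ s.getD lo 0 := hge lo le_rfl (by omega)
        have hlox : s.getD lo 0 ≠ x := fun h => hfound ⟨by omega, h⟩
        have : x < s.getD j 0 :=
          lt_of_lt_of_le (lt_of_le_of_ne hxr (Ne.symm hlox)) (hmono lo j (by omega) hj)
        exact (ne_of_lt this).symm
    rw [sortAndPrintLoop_none s x hne s.length 0 le_rfl]
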